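-- pv_equiv track=rewrite | github.com/gisleyt/samnorsk | docker-dir/createDic4.py | get_collapsed_dictionary
-- ===== SOURCE A (Python) =====
-- def get_collapsed_dictionary(frequencyDict):
--     collapsed_dict = {}
--     for word_pair in frequencyDict.keys():
--         if not word_pair[0] in collapsed_dict:
--             collapsed_dict[word_pair[0]] = {}
--
--         word_idx_dict = collapsed_dict[word_pair[0]]
--         word_idx_dict[word_pair[1]] = frequencyDict[word_pair]
--     return collapsed_dict
-- ===== SOURCE B (Python) =====
-- def get_collapsed_dictionary(frequencyDict):
--     firsts = list(dict.fromkeys(w1 for (w1, _) in frequencyDict))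
--     return {w1: {w2: v for (u, w2), v in frequencyDict.items() if u == w1}
--             for w1 in firsts}
-- ===== Notes on version B (the rewrite author's own statement) =====
-- stated objective: alternative
-- what changed: Replaces A's single-pass hash-as-you-go grouping (create-or-fetch inner dict per pair) with a two-phase comprehension: first collect the distinct first words in order, then build each inner dict by an independent filtering scan of the pairs.
import Mathlib
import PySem

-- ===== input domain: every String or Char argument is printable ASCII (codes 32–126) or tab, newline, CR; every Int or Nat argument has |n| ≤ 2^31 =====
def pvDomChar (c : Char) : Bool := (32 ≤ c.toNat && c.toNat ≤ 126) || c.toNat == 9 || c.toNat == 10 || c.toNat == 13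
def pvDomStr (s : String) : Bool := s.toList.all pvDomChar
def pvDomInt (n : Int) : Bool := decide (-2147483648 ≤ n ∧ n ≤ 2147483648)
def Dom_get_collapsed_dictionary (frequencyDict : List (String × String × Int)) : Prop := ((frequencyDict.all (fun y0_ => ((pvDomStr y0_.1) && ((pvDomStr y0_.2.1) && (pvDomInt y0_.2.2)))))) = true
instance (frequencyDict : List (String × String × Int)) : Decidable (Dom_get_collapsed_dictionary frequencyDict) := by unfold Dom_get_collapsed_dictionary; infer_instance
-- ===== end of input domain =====

-- ===== PORT A =====
-- B groups by collecting distinct first words, then one filtering scan per group (alternative decomposition; A is a single hash-as-you-go pass).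
def get_collapsed_dictionary (frequencyDict : List (String × String × Int)) : List (String × List (String × Int)) :=
  let collapsed_dict : PySem.Dict String (PySem.Dict String Int) :=
    frequencyDict.foldl (fun collapsed_dict word_pair =>
      let collapsed_dict :=
        if ¬ collapsed_dict.contains word_pair.1 then
          collapsed_dict.insert word_pair.1 PySem.Dict.empty
        else collapsed_dict
      let word_idx_dict := collapsed_dict.getD word_pair.1 PySem.Dict.empty
      collapsed_dict.insert word_pair.1 (word_idx_dict.insert word_pair.2.1 word_pair.2.2))
      PySem.Dict.empty
  collapsed_dict.items.map (fun p => (p.1, p.2.items))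

-- ===== PORT B =====
def pvInnerDict (frequencyDict : List (String × String × Int)) (w1 : String) : PySem.Dict String Int :=
  frequencyDict.foldl (fun inner t => if t.1 = w1 then inner.insert t.2.1 t.2.2 else inner)
    PySem.Dict.empty

def get_collapsed_dictionary_alt (frequencyDict : List (String × String × Int)) : List (String × List (String × Int)) :=
  let firsts := PySem.List.dedup (frequencyDict.map (·.1))
  firsts.map (fun w1 => (w1, (pvInnerDict frequencyDict w1).items))

-- ===== PRECONDITION & SPEC =====

def Spec_get_collapsed_dictionary (frequencyDict : List (String × String × Int)) (out : List (String × List (String × Int))) : Prop := out = get_collapsed_dictionary_alt frequencyDict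
instance (frequencyDict : List (String × String × Int)) (out : List (String × List (String × Int))) : Decidable (Spec_get_collapsed_dictionary frequencyDict out) := by unfold Spec_get_collapsed_dictionary; infer_instance

-- ===== CLAIM (what is proved, stated in full; the proofs are below) =====
def Claim_equal_get_collapsed_dictionary : Prop := ∀ (frequencyDict : List (String × String × Int)), Dom_get_collapsed_dictionary frequencyDict → Spec_get_collapsed_dictionary frequencyDict (get_collapsed_dictionary frequencyDict)

-- ===== LEMMAS AND PROOFS =====

-- A's loop body (create-if-absent, fetch, insert) is a single net insert at the first word.
theorem pvStep_eq (d : PySem.Dict String (PySem.Dict String Int)) (t : String × String × Int) :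
    (let d' := if ¬ d.contains t.1 then d.insert t.1 PySem.Dict.empty else d
     d'.insert t.1 ((d'.getD t.1 PySem.Dict.empty).insert t.2.1 t.2.2)) =
    d.insert t.1 ((d.getD t.1 PySem.Dict.empty).insert t.2.1 t.2.2) := by
  by_cases h : d.contains t.1
  · simp [h]
  · simp [h, PySem.Dict.getD_insert_self, PySem.Dict.insert_insert_self,
      PySem.Dict.getD_of_not_contains]

-- the outer fold with the simplified step
def pvF (l : List (String × String × Int)) : PySem.Dict String (PySem.Dict String Int) :=
  l.foldl (fun d t => d.insert t.1 ((d.getD t.1 PySem.Dict.empty).insert t.2.1 t.2.2))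
    PySem.Dict.empty

theorem pvA_eq_F (l : List (String × String × Int)) :
    get_collapsed_dictionary l = (pvF l).items.map (fun p => (p.1, p.2.items)) := by
  unfold get_collapsed_dictionary pvF
  simp only []
  congr 2
  apply PySem.List.foldl_congr_mem
  intro acc t _
  exact pvStep_eq acc t

theorem pvF_keys (l : List (String × String × Int)) :
    (pvF l).keys = PySem.List.dedup (l.map (·.1)) := by
  unfold pvF
  rw [PySem.Dict.keys_foldl_insert_key]
  simp [PySem.Dict.keys_empty]
  rfl

theorem pvF_nodup (l : List (String × String × Int)) : (pvF l).keys.Nodup := by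
  unfold pvF
  exact PySem.Dict.nodup_keys_foldl_insert_key l (·.1) _ _ (by simp [PySem.Dict.keys_empty])

theorem pvF_getD (l : List (String × String × Int))
    (d : PySem.Dict String (PySem.Dict String Int)) (w : String) :
    (l.foldl (fun d t => d.insert t.1 ((d.getD t.1 PySem.Dict.empty).insert t.2.1 t.2.2)) d).getD w PySem.Dict.empty =
    l.foldl (fun inner t => if t.1 = w then inner.insert t.2.1 t.2.2 else inner)
      (d.getD w PySem.Dict.empty) := by
  induction l generalizing d with
  | nil => rfl
  | cons t l ih =>
    simp only [List.foldl_cons, ih]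
    congr 1
    rw [PySem.Dict.getD_insert]
    by_cases h : t.1 = w
    · simp [h]
    · rw [if_neg h, if_neg (fun hh => h hh.symm)]

-- ===== VERDICT (by name: the statement is the Claim_ definition above) =====
theorem get_collapsed_dictionary_spec : Claim_equal_get_collapsed_dictionary := by
  intro l _
  show get_collapsed_dictionary l = get_collapsed_dictionary_alt l
  rw [pvA_eq_F, PySem.Dict.items_eq_map_keys (pvF l) (pvF_nodup l) PySem.Dict.empty,
    List.map_map, pvF_keys]
  unfold get_collapsed_dictionary_alt
  apply List.map_congr_left
  intro w _
  simp only [Function.comp]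
  rw [show (pvF l).getD w PySem.Dict.empty = pvInnerDict l w from by
    unfold pvF pvInnerDict
    rw [pvF_getD]
    simp [PySem.Dict.getD_empty]]
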